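-- pv_equiv track=rewrite | github.com/mopil/algorithm | programmers/lv2/문자열 압축(프로그래머스lv.2).py | solution
-- ===== SOURCE A (Python) =====
-- def compress(arr):
--     i = 0
--     result = ''
--     while i <= len(arr) - 1:
--         target = arr[i]
--         count = 1
--         if i == len(arr) - 1:
--             test = arr[i - 1]
--             target = arr[i]
--         else:
--             test = arr[i + 1]
--         while target == test and i <= len(arr) - 1:
--             test = arr[i]
--             if target != test:
--                 break
--             count += 1
--             i += 1
--         if count == 1:
--             result += target
--             i += 1
--         else:
--             result += str(count - 1) + target
--     return len(result)
--
-- def solution(s):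
--     if len(s) == 1:
--         return 1
--     result = compress(list(s))
--     for i in range(2, len(s)):
--         arr = list([s[j:j + i] for j in range(0, len(s), i)])
--         test = compress(arr)
--         result = min(test, result)
--     return result
-- ===== SOURCE B (Python) =====
-- def _unit_len(s, u):
--     n = len(s)
--     chunks = [s[j:j + u] for j in range(0, n, u)]
--     starts = [k for k in range(len(chunks)) if k == 0 or chunks[k] != chunks[k - 1]]
--     return sum(len(chunks[b]) + (len(str(e - b)) if e - b > 1 else 0)
--                for b, e in zip(starts, starts[1:] + [len(chunks)]))
--
-- def solution(s):
--     n = len(s)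
--     if n <= 1:
--         return n
--     return min(_unit_len(s, u) for u in range(1, n))
-- ===== Notes on version B (the rewrite author's own statement) =====
-- stated objective: alternative
-- what changed: A streams over the chunks with nested while loops, a run counter and a rebuilt encoded string whose length it measures; B instead materialises the list of group-start indices with one filter, then computes the compressed length arithmetically from differences of consecutive start positions (run length = gap between starts), folding all unit sizes 1..n-1 through one min() instead of A's seeded loop with a special case for unit 1.
import Mathlib
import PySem

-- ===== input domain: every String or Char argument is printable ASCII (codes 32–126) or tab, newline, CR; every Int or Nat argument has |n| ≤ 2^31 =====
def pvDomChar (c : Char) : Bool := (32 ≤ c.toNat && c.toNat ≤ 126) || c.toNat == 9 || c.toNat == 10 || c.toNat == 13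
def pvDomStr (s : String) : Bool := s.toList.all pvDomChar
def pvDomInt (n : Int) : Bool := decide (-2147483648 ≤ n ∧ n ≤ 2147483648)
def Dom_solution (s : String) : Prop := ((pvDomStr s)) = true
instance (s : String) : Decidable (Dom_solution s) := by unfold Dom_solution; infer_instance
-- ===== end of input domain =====

-- B replaces A's streaming nested-while RLE (run counter, rebuilt encoded string, per-unit
-- special case) by a staged computation: per unit it lists the group-START indices by a filter,
-- then sums token lengths from differences of consecutive start positions; objective: alternative.


-- ===== PORT A =====
-- Python strings are modelled as List Char (chunks : List (List Char)); arr[..] indexing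
-- uses PySem.List.pyGetD (every index A reads is in range, incl. the arr[i-1] wraparound
-- at i = 0, len = 1, where pyGetD with a negative in-range index is exact).

-- inner `while target == test and i <= len(arr)-1:` loop of A's compress;
-- returns the final (count, i).  The Nat argument is fuel, a totality guard only:
-- the loop advances i by 1 each pass, so `arr.length + 1` passes always suffice
-- at the call site below.
def innerLoop (arr : List (List Char)) :
    Nat → List Char → List Char → Int → Int → Int × Int
  | 0, _, _, count, i => (count, i)
  | fuel + 1, target, test, count, i =>
    if target = test ∧ i ≤ (arr.length : Int) - 1 then
      let test2 := PySem.List.pyGetD arr i []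
      if target ≠ test2 then (count, i)
      else innerLoop arr fuel target test2 (count + 1) (i + 1)
    else (count, i)

-- outer `while i <= len(arr)-1:` loop of A's compress, accumulating result; the Nat
-- argument is fuel (i strictly increases each pass, so `arr.length + 1` suffices).
-- (in Python's last-index branch `target = arr[i]` reassigns the same value; kept as one binding)
def compressLoop (arr : List (List Char)) : Nat → Int → List Char → List Char
  | 0, _, result => result
  | fuel + 1, i, result =>
    if i ≤ (arr.length : Int) - 1 then
      let target := PySem.List.pyGetD arr i []
      let test := if i = (arr.length : Int) - 1 then PySem.List.pyGetD arr (i - 1) []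
                  else PySem.List.pyGetD arr (i + 1) []
      let r := innerLoop arr (arr.length + 1) target test 1 i
      if r.1 = 1 then compressLoop arr fuel (r.2 + 1) (result ++ target)
      else compressLoop arr fuel r.2 (result ++ PySem.Int.toChars (r.1 - 1) ++ target)
    else result

def compress (arr : List (List Char)) : Int :=
  ((compressLoop arr (arr.length + 1) 0 []).length : Int)

def solution (s : String) : Int :=
  if PySem.Str.len s = 1 then 1
  else
    let result := compress (s.toList.map (fun c => [c]))
    (PySem.List.pyRange 2 (PySem.Str.len s) 1).foldl
      (fun result i =>
        let arr := (PySem.List.pyRange 0 (PySem.Str.len s) i).map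
          (fun j => PySem.List.slice s.toList (some j) (some (j + i)))
        min (compress arr) result)
      result

-- ===== PORT B =====
-- per-unit length: chunk the string, list the indices where a new group of equal chunks
-- starts, and sum len(chunk) + digits(run) over consecutive start positions
def unitLen (s : String) (u : Int) : Int :=
  let n := PySem.Str.len s
  let chunks := (PySem.List.pyRange 0 n u).map
    (fun j => PySem.List.slice s.toList (some j) (some (j + u)))
  let starts := (PySem.List.pyRange 0 (chunks.length : Int) 1).filter
    (fun k => decide (k = 0 ∨ PySem.List.pyGetD chunks k [] ≠ PySem.List.pyGetD chunks (k - 1) []))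
  ((starts.zip (PySem.List.slice starts (some 1) none ++ [(chunks.length : Int)])).map
    (fun p => ((PySem.List.pyGetD chunks p.1 []).length : Int) +
      (if p.2 - p.1 > 1 then ((PySem.Int.toChars (p.2 - p.1)).length : Int) else 0))).sum

def solution_alt (s : String) : Int :=
  let n := PySem.Str.len s
  if n ≤ 1 then n
  else
    -- Python: min(_unit_len(s, u) for u in range(1, n)); the range is nonempty since n ≥ 2,
    -- so the `none` default below is unreachable (it only makes the match total)
    match PySem.List.min? ((PySem.List.pyRange 1 n 1).map (fun u => unitLen s u)) (fun x => x) with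
    | some m => m
    | none => 0

-- ===== PRECONDITION & SPEC =====
def Spec_solution (s : String) (out : Int) : Prop := out = solution_alt s
instance (s : String) (out : Int) : Decidable (Spec_solution s out) := by unfold Spec_solution; infer_instance

-- ===== CLAIM (what is proved, stated in full; the proofs are below) =====
def Claim_equal_solution : Prop := ∀ (s : String), Dom_solution s → Spec_solution s (solution s)

-- ===== LEMMAS AND PROOFS =====

-- length of the leading run of chunks equal to x
def lead (x : List Char) (l : List (List Char)) : Nat :=
  (l.takeWhile (fun y => y == x)).length

-- canonical run-length-encoded size of a chunk list (counts written for runs ≥ 2,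
-- as both programs do)
def cost : List (List Char) → Nat
  | [] => 0
  | x :: xs =>
      (if lead x xs = 0 then x.length
       else (PySem.Int.toChars ((lead x xs : Int) + 1)).length + x.length)
      + cost (xs.drop (lead x xs))
termination_by l => l.length
decreasing_by simp [List.length_drop]

theorem cost_nil : cost [] = 0 := by simp [cost]

theorem cost_cons (x : List Char) (xs : List (List Char)) : cost (x :: xs) =
    (if lead x xs = 0 then x.length
     else (PySem.Int.toChars ((lead x xs : Int) + 1)).length + x.length)
    + cost (xs.drop (lead x xs)) := by rw [cost.eq_def]

theorem lead_cons_eq (x : List Char) (xs : List (List Char)) :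
    lead x (x :: xs) = lead x xs + 1 := by
  simp [lead]

theorem lead_cons_ne {x y : List Char} (h : y ≠ x) (xs : List (List Char)) :
    lead x (y :: xs) = 0 := by
  simp [lead, h]

theorem lead_le (x : List Char) (l : List (List Char)) : lead x l ≤ l.length :=
  (List.takeWhile_sublist _).length_le

theorem lead_get (x : List Char) (l : List (List Char)) :
    ∀ j, j < lead x l → l[j]? = some x := by
  induction l with
  | nil => simp [lead]
  | cons y ys ih =>
    intro j hj
    by_cases hxy : y = x
    · subst hxy
      rw [lead_cons_eq] at hj
      cases j with
      | zero => simp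
      | succ j => simpa using ih j (by omega)
    · rw [lead_cons_ne hxy] at hj; omega

theorem get_lead (x : List Char) (l : List (List Char)) (h : lead x l < l.length) :
    l[lead x l]? ≠ some x := by
  induction l with
  | nil => simp [lead] at h
  | cons y ys ih =>
    by_cases hxy : y = x
    · subst hxy
      rw [lead_cons_eq] at h ⊢
      simp only [List.length_cons] at h
      simpa using ih (by omega)
    · rw [lead_cons_ne hxy] at h ⊢
      simpa using fun hc => hxy hc

-- the inner while loop, entered with test == target, counts the leading run
theorem innerLoop_zero (arr : List (List Char)) (target test : List Char) (count i : Int) :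
    innerLoop arr 0 target test count i = (count, i) := rfl

theorem innerLoop_succ (arr : List (List Char)) (fuel : Nat) (target test : List Char)
    (count i : Int) :
    innerLoop arr (fuel + 1) target test count i =
      (if target = test ∧ i ≤ (arr.length : Int) - 1 then
        let test2 := PySem.List.pyGetD arr i []
        if target ≠ test2 then (count, i)
        else innerLoop arr fuel target test2 (count + 1) (i + 1)
      else (count, i)) := rfl

theorem compressLoop_zero (arr : List (List Char)) (i : Int) (result : List Char) :
    compressLoop arr 0 i result = result := rfl

theorem compressLoop_succ (arr : List (List Char)) (fuel : Nat) (i : Int) (result : List Char) :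
    compressLoop arr (fuel + 1) i result =
      (if i ≤ (arr.length : Int) - 1 then
        let target := PySem.List.pyGetD arr i []
        let test := if i = (arr.length : Int) - 1 then PySem.List.pyGetD arr (i - 1) []
                    else PySem.List.pyGetD arr (i + 1) []
        let r := innerLoop arr (arr.length + 1) target test 1 i
        if r.1 = 1 then compressLoop arr fuel (r.2 + 1) (result ++ target)
        else compressLoop arr fuel r.2 (result ++ PySem.Int.toChars (r.1 - 1) ++ target)
      else result) := rfl

-- the inner while loop, entered with test == target and enough fuel, counts the leading run
theorem innerLoop_run (arr : List (List Char)) (t : List Char) :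
    ∀ (fuel : Nat) (c i : Int), 0 ≤ i → (((arr.length : Int)) - i).toNat ≤ fuel →
    innerLoop arr fuel t t c i =
      (c + (lead t (arr.drop i.toNat) : Int), i + (lead t (arr.drop i.toNat) : Int)) := by
  intro fuel
  induction fuel with
  | zero =>
    intro c i h0 hf
    have : arr.drop i.toNat = [] := List.drop_eq_nil_of_le (by omega)
    simp [innerLoop_zero, this, lead]
  | succ fuel ih =>
    intro c i h0 hf
    rw [innerLoop_succ]
    dsimp only
    split
    · rename_i hc
      have hilt : i.toNat < arr.length := by omega
      have hdrop : arr.drop i.toNat = arr[i.toNat] :: arr.drop (i.toNat + 1) :=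
        List.drop_eq_getElem_cons hilt
      have hget : PySem.List.pyGetD arr i [] = arr[i.toNat] :=
        PySem.List.pyGetD_eq_getElem arr [] h0 (by omega)
      split
      · rename_i hne
        rw [hget] at hne
        have : lead t (arr.drop i.toNat) = 0 := by
          rw [hdrop]; exact lead_cons_ne (fun hh => hne hh.symm) _
        simp [this]
      · rename_i hne
        have heq : arr[i.toNat] = t := by rw [hget] at hne; tauto
        have hI := ih (c + 1) (i + 1) (by omega) (by omega)
        rw [hget, heq, hI]
        have hdd : (arr.drop (i + 1).toNat) = arr.drop (i.toNat + 1) := by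
          congr 1; omega
        rw [hdd]
        have hlead : lead t (arr.drop i.toNat) = lead t (arr.drop (i.toNat + 1)) + 1 := by
          rw [hdrop, heq]; exact lead_cons_eq _ _
        rw [hlead]
        simp only [Prod.mk.injEq]
        omega
    · rename_i hc
      have hge : ¬ i ≤ (arr.length : Int) - 1 := fun hh => hc ⟨rfl, hh⟩
      have : arr.drop i.toNat = [] := by
        apply List.drop_eq_nil_of_le
        omega
      simp [this, lead]

-- the outer loop of A's compress produces, in characters, exactly the canonical
-- RLE size of the remaining suffix, provided i sits on a run boundary
theorem compressLoop_cost (arr : List (List Char)) :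
    ∀ (n : Nat) (i : Int) (res : List Char),
    0 ≤ i → arr.length ≤ i.toNat + n →
    (i.toNat < arr.length → ((i = 0 → 2 ≤ arr.length) ∧
        (0 < i → arr[i.toNat - 1]? ≠ arr[i.toNat]?))) →
    (compressLoop arr n i res).length = res.length + cost (arr.drop i.toNat) := by
  intro n
  induction n with
  | zero =>
    intro i res h0 hn hb
    rw [compressLoop_zero]
    have : arr.drop i.toNat = [] := List.drop_eq_nil_of_le (by omega)
    rw [this]
    simp [cost_nil]
  | succ n ih =>
    intro i res h0 hn hb
    by_cases hend : i ≤ (arr.length : Int) - 1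
    · have hilt : i.toNat < arr.length := by omega
      have hdrop : arr.drop i.toNat = arr[i.toNat] :: arr.drop (i.toNat + 1) :=
        List.drop_eq_getElem_cons hilt
      have hget : PySem.List.pyGetD arr i [] = arr[i.toNat] :=
        PySem.List.pyGetD_eq_getElem arr [] h0 (by omega)
      rw [compressLoop_succ, if_pos hend]
      dsimp only
      by_cases hlast : i = (arr.length : Int) - 1
      · -- last index: test = arr[i-1] ≠ arr[i] (i = 0 with len = 1 is excluded)
        have h2 := (hb hilt)
        by_cases hi0 : i = 0
        · exfalso; have := h2.1 hi0; omega
        · have hipos : 0 < i := by omega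
          have hgetm : PySem.List.pyGetD arr (i - 1) [] = arr[(i - 1).toNat] :=
            PySem.List.pyGetD_eq_getElem arr [] (by omega) (by omega)
          have hm1 : (i - 1).toNat = i.toNat - 1 := by omega
          have hne : PySem.List.pyGetD arr (i - 1) [] ≠ PySem.List.pyGetD arr i [] := by
            simp only [hm1] at hgetm
            rw [hget, hgetm]
            intro hc
            apply h2.2 hipos
            rw [List.getElem?_eq_getElem (show i.toNat - 1 < arr.length by omega),
              List.getElem?_eq_getElem hilt, hc]
          rw [if_pos hlast]
          have hil : innerLoop arr (arr.length + 1) (PySem.List.pyGetD arr i [])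
              (PySem.List.pyGetD arr (i - 1) []) 1 i = (1, i) := by
            rw [innerLoop_succ]
            rw [if_neg (by intro hc; exact hne hc.1.symm)]
          rw [hil]
          dsimp only
          rw [if_pos rfl]
          have hrest : arr.drop (i.toNat + 1) = [] := List.drop_eq_nil_of_le (by omega)
          have hrec := ih (i + 1) (res ++ PySem.List.pyGetD arr i [])
            (by omega) (by omega) (by intro hc; omega)
          rw [hrec]
          have hd1 : (i + 1).toNat = i.toNat + 1 := by omega
          rw [hd1, hrest, hdrop, hrest, cost_cons]
          have hl0 : lead arr[i.toNat] ([] : List (List Char)) = 0 := by simp [lead]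
          rw [hl0]
          simp [cost_nil, hget]
      · -- not the last index: test = arr[i+1]
        have hlt2 : i.toNat + 1 < arr.length := by omega
        have hgetp : PySem.List.pyGetD arr (i + 1) [] = arr[i.toNat + 1] := by
          have h1 : PySem.List.pyGetD arr (i + 1) [] = arr[(i + 1).toNat] :=
            PySem.List.pyGetD_eq_getElem arr [] (by omega) (by omega)
          rw [h1]
          congr 1
          omega
        rw [if_neg hlast]
        have hdrop2 : arr.drop (i.toNat + 1) = arr[i.toNat + 1] :: arr.drop (i.toNat + 2) :=
          List.drop_eq_getElem_cons hlt2
        by_cases heq : arr[i.toNat + 1] = arr[i.toNat]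
        · -- a run of length m ≥ 2 begins at i
          have hil := innerLoop_run arr arr[i.toNat] (arr.length + 1) 1 i h0 (by omega)
          have e1 : lead arr[i.toNat] (arr.drop i.toNat)
              = lead arr[i.toNat] (arr.drop (i.toNat + 1)) + 1 := by
            rw [hdrop]; exact lead_cons_eq _ _
          have e2 : lead arr[i.toNat] (arr.drop (i.toNat + 1))
              = lead arr[i.toNat] (arr.drop (i.toNat + 2)) + 1 := by
            rw [hdrop2, heq]; exact lead_cons_eq _ _
          have hmge : 2 ≤ lead arr[i.toNat] (arr.drop i.toNat) := by omega
          have hmle : lead arr[i.toNat] (arr.drop i.toNat) ≤ arr.length - i.toNat := by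
            have := lead_le arr[i.toNat] (arr.drop i.toNat)
            simpa [List.length_drop] using this
          rw [hget, hgetp, heq, hil]
          dsimp only
          set m := lead arr[i.toNat] (arr.drop i.toNat) with hm
          rw [if_neg (by omega)]
          have hi2 : (i + (m : Int)).toNat = i.toNat + m := by omega
          have hbnd : (i + (m : Int)).toNat < arr.length →
              ((i + (m : Int)) = 0 → 2 ≤ arr.length) ∧
              (0 < i + (m : Int) →
                arr[(i + (m : Int)).toNat - 1]? ≠ arr[(i + (m : Int)).toNat]?) := by
            intro hlt
            constructor
            · intro hc; omega
            · intro _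
              rw [hi2] at hlt ⊢
              have hprev : arr[i.toNat + m - 1]? = some arr[i.toNat] := by
                have h1 : (arr.drop i.toNat)[m - 1]? = some arr[i.toNat] :=
                  lead_get _ _ _ (by omega)
                rw [List.getElem?_drop] at h1
                rw [show i.toNat + m - 1 = i.toNat + (m - 1) by omega]
                exact h1
              have hcur : arr[i.toNat + m]? ≠ some arr[i.toNat] := by
                have h1 : (arr.drop i.toNat)[m]? ≠ some arr[i.toNat] := by
                  apply get_lead
                  simp [List.length_drop]
                  omega
                rw [List.getElem?_drop] at h1
                exact h1
              rw [hprev]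
              intro hc
              exact hcur hc.symm
          have hrec := ih (i + (m : Int))
            (res ++ PySem.Int.toChars (1 + (m : Int) - 1) ++ arr[i.toNat])
            (by omega) (by omega) hbnd
          rw [hrec, hi2]
          have hk : lead arr[i.toNat] (arr.drop (i.toNat + 1)) = m - 1 := by omega
          rw [hdrop, cost_cons, hk]
          rw [if_neg (by omega)]
          have hdd : (arr.drop (i.toNat + 1)).drop (m - 1) = arr.drop (i.toNat + m) := by
            rw [List.drop_drop]
            congr 1
            omega
          rw [hdd]
          have hcast : ((m : Nat) - 1 : Nat) = ((1 : Int) + (m : Int) - 1 - 1).toNat := by omega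
          have htc : PySem.Int.toChars (1 + (m : Int) - 1) = PySem.Int.toChars ((m - 1 : Nat) + 1 : Int) := by
            congr 1
            omega
          rw [htc]
          simp
          omega
        · -- single chunk at i
          have hil : innerLoop arr (arr.length + 1) (PySem.List.pyGetD arr i [])
              (PySem.List.pyGetD arr (i + 1) []) 1 i = (1, i) := by
            rw [innerLoop_succ]
            rw [if_neg (by
              intro hc
              rw [hget, hgetp] at hc
              exact heq hc.1.symm)]
          rw [hil]
          dsimp only
          rw [if_pos rfl]
          have hbnd : (i + 1).toNat < arr.length →
              ((i + 1) = 0 → 2 ≤ arr.length) ∧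
              (0 < i + 1 → arr[(i + 1).toNat - 1]? ≠ arr[(i + 1).toNat]?) := by
            intro hlt
            refine ⟨by omega, fun _ => ?_⟩
            have h1 : (i + 1).toNat - 1 = i.toNat := by omega
            have h2 : (i + 1).toNat = i.toNat + 1 := by omega
            rw [h1, h2, List.getElem?_eq_getElem hilt, List.getElem?_eq_getElem hlt2]
            intro hc
            apply heq
            have := Option.some.inj hc
            exact this.symm
          have hrec := ih (i + 1) (res ++ PySem.List.pyGetD arr i [])
            (by omega) (by omega) hbnd
          rw [hrec]
          have h2 : (i + 1).toNat = i.toNat + 1 := by omega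
          rw [h2, hdrop, cost_cons]
          have hl0 : lead arr[i.toNat] (arr.drop (i.toNat + 1)) = 0 := by
            rw [hdrop2]
            exact lead_cons_ne heq _
          rw [hl0]
          simp [hget]
          omega
    · rw [compressLoop_succ, if_neg hend]
      have : arr.drop i.toNat = [] := List.drop_eq_nil_of_le (by omega)
      rw [this]
      simp [cost_nil]

theorem compress_cost (arr : List (List Char)) (h : arr.length ≠ 1) :
    compress arr = (cost arr : Int) := by
  unfold compress
  rw [compressLoop_cost arr (arr.length + 1) 0 [] (by omega) (by omega)
    (by intro hlt; exact ⟨fun _ => by omega, fun hc => absurd hc (by omega)⟩)]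
  simp

-- ===== B-side: the starts-list computation equals the same canonical RLE size =====

def startsR : List (List Char) → List Int
  | [] => []
  | x :: xs => 0 :: (startsR ((x :: xs).drop (lead x xs + 1))).map (· + ((lead x xs : Nat) + 1 : Int))
termination_by c => c.length
decreasing_by simp [List.length_drop]

theorem startsR_cons (x : List Char) (xs : List (List Char)) :
    startsR (x :: xs) =
      0 :: (startsR ((x :: xs).drop (lead x xs + 1))).map (· + ((lead x xs : Nat) + 1 : Int)) := by
  rw [startsR.eq_def]

theorem startsR_mem : ∀ (c : List (List Char)) (k : Int), k ∈ startsR c →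
    0 ≤ k ∧ k < (c.length : Int) := by
  intro c
  induction c using startsR.induct with
  | case1 => intro k hk; simp [startsR] at hk
  | case2 x xs ih =>
    intro k hk
    rw [startsR_cons] at hk
    rcases List.mem_cons.mp hk with h0 | hmem
    · subst h0
      refine ⟨le_refl 0, ?_⟩
      simp
    · obtain ⟨k', hk', rfl⟩ := List.mem_map.mp hmem
      have h := ih k' hk'
      have hl := lead_le x xs
      simp only [List.length_drop, List.length_cons] at h
      constructor
      · omega
      · simp only [List.length_cons]
        push_cast at h ⊢
        omega

def startsOf (c : List (List Char)) : List Int :=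
  (PySem.List.pyRange 0 (c.length : Int) 1).filter
    (fun k => decide (k = 0 ∨ PySem.List.pyGetD c k [] ≠ PySem.List.pyGetD c (k - 1) []))

theorem run_get (x : List Char) (xs : List (List Char)) (j : Nat) (hj : j ≤ lead x xs) :
    (x :: xs)[j]? = some x := by
  apply lead_get
  rw [lead_cons_eq]
  omega

theorem pyGetD_toNat (xs : List (List Char)) (i : Int) (d : List Char) (h : 0 ≤ i) :
    PySem.List.pyGetD xs i d = xs.getD i.toNat d := by
  have hi : i = ((i.toNat : Nat) : Int) := by omega
  rw [hi, PySem.List.pyGetD_natCast]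
  simp
  rw [show max i 0 = i from by omega]

theorem startsOf_eq (c : List (List Char)) : startsOf c = startsR c := by
  induction c using startsR.induct with
  | case1 => simp [startsOf, startsR]
  | case2 x xs ih =>
    obtain ⟨m, hm⟩ : ∃ m, lead x xs = m := ⟨_, rfl⟩
    have hml : m ≤ xs.length := hm ▸ lead_le x xs
    have hx : ∀ j : Nat, j ≤ m → (x :: xs)[j]? = some x := by
      intro j hj
      apply run_get
      omega
    rw [startsR_cons, ← ih, hm]
    obtain ⟨d, hd⟩ : ∃ d, (x :: xs).drop (m + 1) = d := ⟨_, rfl⟩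
    rw [hd]
    have hdl : d.length = xs.length - m := by rw [← hd]; simp
    have hdj : ∀ j : Nat, d[j]? = (x :: xs)[m + 1 + j]? := by
      intro j
      rw [← hd, List.getElem?_drop]
    unfold startsOf
    rw [show ((x :: xs).length : Int) = ((xs.length : Int) + 1) by simp]
    rw [PySem.List.pyRange_one_append 0 ((m : Int) + 1) ((xs.length : Int) + 1)
      (by omega) (by omega)]
    rw [List.filter_append]
    have hseg1 : (PySem.List.pyRange 0 ((m : Int) + 1) 1).filter
        (fun k => decide (k = 0 ∨ PySem.List.pyGetD (x :: xs) k [] ≠ PySem.List.pyGetD (x :: xs) (k - 1) [])) = [0] := by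
      rw [PySem.List.pyRange_one_cons (by omega), List.filter_cons]
      rw [if_pos (by simp)]
      congr 1
      rw [List.filter_eq_nil_iff]
      intro k hk
      rw [PySem.List.mem_pyRange_one] at hk
      simp only [decide_eq_true_eq, not_or, ne_eq, not_not]
      refine ⟨by omega, ?_⟩
      rw [pyGetD_toNat _ _ _ (by omega), pyGetD_toNat _ _ _ (by omega)]
      have g1 := hx k.toNat (by omega)
      have g2 := hx (k - 1).toNat (by omega)
      rw [List.getD_eq_getElem?_getD, List.getD_eq_getElem?_getD, g1, g2]
    rw [hseg1]
    -- second segment: shift the filter over the dropped suffix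
    rw [PySem.List.pyRange_one, PySem.List.pyRange_one]
    rw [show ((xs.length : Int) + 1 - ((m : Int) + 1)).toNat = d.length by omega]
    rw [show ((d.length : Int) - 0).toNat = d.length by omega]
    rw [List.filter_map, List.filter_map, List.map_map]
    rw [List.filter_congr (q := fun k : Nat =>
        decide (((0 : Int) + (k : Nat)) = 0 ∨
          PySem.List.pyGetD d ((0 : Int) + (k : Nat)) [] ≠ PySem.List.pyGetD d ((0 : Int) + (k : Nat) - 1) [])) ?_]
    · rw [List.singleton_append]
      congr 1
      simp only [Function.comp_def]
      apply List.map_congr_left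
      intro k _
      omega
    · intro k hk
      rw [List.mem_range] at hk
      simp only [Function.comp]
      rw [decide_eq_decide]
      have e1 : PySem.List.pyGetD (x :: xs) ((m : Int) + 1 + (k : Nat)) [] = d.getD k [] := by
        rw [pyGetD_toNat _ _ _ (by omega),
          show ((m : Int) + 1 + (k : Nat)).toNat = m + 1 + k by omega,
          List.getD_eq_getElem?_getD, List.getD_eq_getElem?_getD, hdj k]
      have hd0lt : 0 < d.length := by omega
      cases k with
      | zero =>
        -- both conditions hold: d's head differs from the chunk before it
        have hnx : (x :: xs)[m + 1]? ≠ some x := by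
          have hlc : lead x (x :: xs) = m + 1 := by rw [lead_cons_eq, hm]
          have := get_lead x (x :: xs) (by rw [hlc]; simp; omega)
          rw [hlc] at this
          exact this
        have hdx : d.getD 0 [] ≠ x := by
          have h00 : d[0]? = (x :: xs)[m + 1]? := by rw [hdj 0, Nat.add_zero]
          rcases h0 : d[0]? with _ | v
          · rw [List.getElem?_eq_none_iff] at h0; omega
          · rw [List.getD_eq_getElem?_getD, h0]
            simp only [Option.getD_some]
            intro hvx
            exact hnx (by rw [← h00, h0, hvx])
        constructor
        · intro _
          left
          simp
        · intro _
          right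
          rw [e1]
          rw [pyGetD_toNat _ _ _ (by omega),
            show ((m : Int) + 1 + ((0 : Nat) : Int) - 1).toNat = m by omega]
          have hgm : (x :: xs).getD m [] = x := by
            rw [List.getD_eq_getElem?_getD, hx m (le_refl m)]
            rfl
          rw [hgm]
          exact hdx
      | succ j =>
        have e2 : PySem.List.pyGetD (x :: xs) ((m : Int) + 1 + ((j + 1 : Nat) : Int) - 1) []
            = d.getD j [] := by
          rw [pyGetD_toNat _ _ _ (by push_cast; omega),
            show ((m : Int) + 1 + ((j + 1 : Nat) : Int) - 1).toNat = m + 1 + j by push_cast; omega,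
            List.getD_eq_getElem?_getD, List.getD_eq_getElem?_getD, hdj j]
        have e3 : PySem.List.pyGetD d ((0 : Int) + ((j + 1 : Nat) : Int) - 1) [] = d.getD j [] := by
          rw [pyGetD_toNat _ _ _ (by push_cast; omega),
            show ((0 : Int) + ((j + 1 : Nat) : Int) - 1).toNat = j by push_cast; omega]
        have e4 : PySem.List.pyGetD d ((0 : Int) + ((j + 1 : Nat) : Int)) [] = d.getD (j + 1) [] := by
          rw [pyGetD_toNat _ _ _ (by push_cast; omega),
            show ((0 : Int) + ((j + 1 : Nat) : Int)).toNat = j + 1 by push_cast; omega]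
        rw [e1, e2, e3, e4, List.getD_eq_getElem?_getD]
        constructor
        · intro h
          rcases h with h | h
          · exfalso; push_cast at h; omega
          · right; rw [List.getD_eq_getElem?_getD]; exact h
        · intro h
          rcases h with h | h
          · exfalso; push_cast at h; omega
          · right; rw [← List.getD_eq_getElem?_getD]; exact h

def gtok (c : List (List Char)) (p : Int × Int) : Int :=
  ((PySem.List.pyGetD c p.1 []).length : Int) +
    (if p.2 - p.1 > 1 then ((PySem.Int.toChars (p.2 - p.1)).length : Int) else 0)

def sumP (c : List (List Char)) (ks : List Int) (L : Int) : Int :=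
  ((ks.zip (ks.tail ++ [L])).map (gtok c)).sum

theorem sumP_startsR (c : List (List Char)) :
    sumP c (startsR c) (c.length : Int) = (cost c : Int) := by
  induction c using startsR.induct with
  | case1 => simp [sumP, startsR, cost]
  | case2 x xs ih =>
    obtain ⟨m, hm⟩ : ∃ m, lead x xs = m := ⟨_, rfl⟩
    have hml : m ≤ xs.length := hm ▸ lead_le x xs
    obtain ⟨d, hd⟩ : ∃ d, (x :: xs).drop (m + 1) = d := ⟨_, rfl⟩
    have hxd : xs.drop m = d := by rw [← hd]; rfl
    have hdl : d.length = xs.length - m := by rw [← hd]; simp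
    have hdj : ∀ j : Nat, d[j]? = (x :: xs)[m + 1 + j]? := by
      intro j
      rw [← hd, List.getElem?_drop]
    rw [hm, hd] at ih
    rw [startsR_cons, hm, hd, cost_cons, hm, hxd]
    by_cases hdn : d = []
    · -- single group: the whole list is one run of x's
      have hxl : xs.length = m := by
        rw [hdn] at hdl
        simp at hdl
        omega
      rw [hdn, show startsR [] = [] from by simp [startsR]]
      unfold sumP
      simp only [List.map_nil, List.tail_cons, List.nil_append, List.zip_cons_cons,
        List.zip_nil_right, List.map_cons, List.map_nil, List.sum_cons, List.sum_nil]
      unfold gtok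
      simp only [PySem.List.pyGetD_zero_cons, List.length_cons, hxl]
      rw [show ((m + 1 : Nat) : Int) - 0 = (m : Int) + 1 by push_cast; ring]
      rw [show cost [] = 0 from by simp [cost]]
      rcases Nat.eq_zero_or_pos m with h0 | hpos
      · subst h0
        norm_num
      · rw [if_pos (by omega), if_neg (by omega)]
        push_cast
        ring
    · obtain ⟨d0, d', hdd⟩ := List.exists_cons_of_ne_nil hdn
      obtain ⟨rest, hrest⟩ : ∃ rest, startsR d = 0 :: rest := by
        rw [hdd, startsR_cons]
        exact ⟨_, rfl⟩
      unfold sumP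
      rw [hrest]
      simp only [List.map_cons, List.tail_cons]
      rw [List.cons_append, List.zip_cons_cons]
      have hL : ((x :: xs).length : Int) = ((d.length : Int) + ((m : Int) + 1)) := by
        simp only [List.length_cons]
        push_cast
        omega
      rw [hL]
      have hmapappend : (rest.map (· + ((m : Int) + 1))) ++ [((d.length : Int) + ((m : Int) + 1))]
          = (rest ++ [(d.length : Int)]).map (· + ((m : Int) + 1)) := by
        rw [List.map_append]
        rfl
      rw [hmapappend]
      rw [show ((0 : Int) + ((m : Int) + 1)) :: rest.map (· + ((m : Int) + 1))
          = (0 :: rest).map (· + ((m : Int) + 1)) from rfl]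
      rw [← hrest, show rest = (startsR d).tail from by rw [hrest]; rfl]
      rw [List.zip_map, List.map_cons, List.sum_cons, List.map_map]
      have hcong : ∀ p ∈ (startsR d).zip ((startsR d).tail ++ [(d.length : Int)]),
          (gtok (x :: xs) ∘ Prod.map (· + ((m : Int) + 1)) (· + ((m : Int) + 1))) p = gtok d p := by
        intro p hp
        have hp1 : p.1 ∈ startsR d := (List.of_mem_zip hp).1
        have hb := startsR_mem d p.1 hp1
        simp only [Function.comp, Prod.map, gtok]
        have harg : p.2 + ((m : Int) + 1) - (p.1 + ((m : Int) + 1)) = p.2 - p.1 := by ring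
        have hel : PySem.List.pyGetD (x :: xs) (p.1 + ((m : Int) + 1)) []
            = PySem.List.pyGetD d p.1 [] := by
          rw [pyGetD_toNat _ _ _ (by omega), pyGetD_toNat _ _ _ (by omega),
            show (p.1 + ((m : Int) + 1)).toNat = m + 1 + p.1.toNat by omega,
            List.getD_eq_getElem?_getD, List.getD_eq_getElem?_getD, hdj p.1.toNat]
        rw [harg, hel]
      rw [List.map_congr_left hcong]
      have hsum : (((startsR d).zip ((startsR d).tail ++ [(d.length : Int)])).map (gtok d)).sum
          = sumP d (startsR d) ((d.length : Int)) := rfl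
      rw [hsum, ih]
      unfold gtok
      simp only [PySem.List.pyGetD_zero_cons]
      rw [show (0 : Int) + ((m : Int) + 1) - 0 = (m : Int) + 1 by ring]
      rcases Nat.eq_zero_or_pos m with h0 | hpos
      · subst h0
        norm_num
      · rw [if_pos (by omega), if_neg (by omega)]
        push_cast
        ring

theorem unitLen_cost (s : String) (u : Int) :
    unitLen s u = (cost ((PySem.List.pyRange 0 (PySem.Str.len s) u).map
      (fun j => PySem.List.slice s.toList (some j) (some (j + u)))) : Int) := by
  show (((startsOf ((PySem.List.pyRange 0 (PySem.Str.len s) u).map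
      (fun j => PySem.List.slice s.toList (some j) (some (j + u))))).zip
      (PySem.List.slice (startsOf ((PySem.List.pyRange 0 (PySem.Str.len s) u).map
        (fun j => PySem.List.slice s.toList (some j) (some (j + u))))) (some 1) none ++
        [((((PySem.List.pyRange 0 (PySem.Str.len s) u).map
          (fun j => PySem.List.slice s.toList (some j) (some (j + u)))).length : Int))])).map
      (gtok ((PySem.List.pyRange 0 (PySem.Str.len s) u).map
        (fun j => PySem.List.slice s.toList (some j) (some (j + u)))))).sum
      = _
  generalize ((PySem.List.pyRange 0 (PySem.Str.len s) u).map
      (fun j => PySem.List.slice s.toList (some j) (some (j + u)))) = C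
  rw [PySem.List.slice_from_one]
  show sumP C (startsOf C) ((C.length : Int)) = (cost C : Int)
  rw [startsOf_eq, sumP_startsR]

-- ===== the chunk lists of the two programs =====

-- unit size 1 chunks A's compress(list(s)) into the same list of singleton chunks
theorem chunks_singleton (l : List Char) :
    (PySem.List.pyRange 0 (l.length : Int) 1).map
      (fun j => PySem.List.slice l (some j) (some (j + 1)))
    = l.map (fun c => [c]) := by
  rw [PySem.List.pyRange_one, List.map_map]
  apply List.ext_getElem
  · simp
  · intro k hk1 hk2
    simp only [List.length_map, List.length_range] at hk1
    have hk : k < l.length := by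
      simpa using hk1
    simp only [List.getElem_map, List.getElem_range, Function.comp]
    have h0 : (0 : Int) + (k : Int) = ((k : Nat) : Int) := by omega
    rw [h0]
    have h1 : ((k : Nat) : Int) + 1 = (((k + 1 : Nat)) : Int) := by omega
    rw [h1, PySem.List.slice_natCast]
    have h2 : k + 1 - k = 1 := by omega
    rw [h2, List.drop_eq_getElem_cons hk, List.take_succ_cons, List.take_zero]

theorem two_le_length_of_mem {l : List Int} {a b : Int} (ha : a ∈ l) (hb : b ∈ l)
    (hne : a ≠ b) : 2 ≤ l.length := by
  match l with
  | [] => simp at ha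
  | [x] =>
    simp at ha hb
    exact absurd (ha.trans hb.symm) hne
  | x :: y :: t => simp

-- the two programs agree on every string
theorem solution_eq_alt (s : String) : solution s = solution_alt s := by
  unfold solution solution_alt
  simp only [PySem.Str.len_eq]
  by_cases h1 : ((s.toList.length : Nat) : Int) = 1
  · rw [if_pos h1, if_pos (by omega)]
    omega
  · rw [if_neg h1]
    by_cases h0 : s.toList.length = 0
    · have hnil : s.toList = [] := List.length_eq_zero_iff.mp h0
      rw [if_pos (by omega)]
      rw [hnil]
      simp only [List.length_nil, Nat.cast_zero]
      rw [PySem.List.pyRange_one_eq_nil (by omega)]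
      simp only [List.foldl_nil, List.map_nil]
      rw [compress_cost [] (by simp), cost_nil]
      omega
    · have h2 : 2 ≤ s.toList.length := by omega
      rw [if_neg (by omega)]
      -- every unit size in [1, n) produces at least two chunks
      have hlen2 : ∀ u : Int, 1 ≤ u → u < ((s.toList.length : Nat) : Int) →
          ((PySem.List.pyRange 0 ((s.toList.length : Nat) : Int) u).map
            (fun j => PySem.List.slice s.toList (some j) (some (j + u)))).length ≠ 1 := by
        intro u hu1 hun
        have hmem0 : (0 : Int) ∈ PySem.List.pyRange 0 ((s.toList.length : Nat) : Int) u := by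
          rw [PySem.List.mem_pyRange_iff_of_pos (by omega)]
          exact ⟨by omega, by omega, by simp⟩
        have hmemu : u ∈ PySem.List.pyRange 0 ((s.toList.length : Nat) : Int) u := by
          rw [PySem.List.mem_pyRange_iff_of_pos (by omega)]
          exact ⟨by omega, by omega, by simp⟩
        rw [List.length_map]
        have := two_le_length_of_mem hmem0 hmemu (by omega)
        omega
      have hunit : ∀ u : Int, 1 ≤ u → u < ((s.toList.length : Nat) : Int) →
          compress ((PySem.List.pyRange 0 ((s.toList.length : Nat) : Int) u).map
            (fun j => PySem.List.slice s.toList (some j) (some (j + u))))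
          = unitLen s u := by
        intro u hu1 hun
        rw [compress_cost _ (hlen2 u hu1 hun)]
        rw [unitLen_cost s u, PySem.Str.len_eq]
      -- B's min over the mapped list is a running min starting at unitLen s 1
      rw [PySem.List.pyRange_one_cons (show (1 : Int) < ((s.toList.length : Nat) : Int) by omega)]
      rw [List.map_cons, PySem.List.min?_id_cons]
      -- A's seed equals unitLen s 1
      have hinit : compress (s.toList.map (fun c => [c])) = unitLen s 1 := by
        rw [← chunks_singleton s.toList]
        exact hunit 1 (by omega) (by omega)
      rw [hinit]
      rw [List.foldl_map]
      have hfold := PySem.List.foldl_congr_mem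
        (l := PySem.List.pyRange 2 ((s.toList.length : Nat) : Int) 1)
        (f := fun (result : Int) (i : Int) => min
          (compress ((PySem.List.pyRange 0 ((s.toList.length : Nat) : Int) i).map
            (fun j => PySem.List.slice s.toList (some j) (some (j + i))))) result)
        (g := fun (b : Int) (u : Int) => min b (unitLen s u))
        (init := unitLen s 1)
        (by
          intro acc u hu
          rw [PySem.List.mem_pyRange_one] at hu
          dsimp only
          rw [hunit u (by omega) hu.2, min_comm])
      rw [hfold]
      norm_num

-- ===== VERDICT (by name: the statement is the Claim_ definition above) =====
theorem solution_spec : Claim_equal_solution := by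
  intro s _
  unfold Spec_solution
  exact solution_eq_alt s
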